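-- pv_equiv track=rewrite | github.com/crash-and-compile/dc32-problems | quagmire-hard/solution.py | quagmire_decrypt
-- ===== SOURCE A (Python) =====
-- def create_custom_alphabet(key):
--     base_alphabet = "ABCDEFGHIJKLMNOPQRSTUVWXYZ"
--     key_unique = ''.join(sorted(set(key), key=lambda x: key.index(x)))
--     remaining_letters = ''.join([c for c in base_alphabet if c not in key_unique])
--     custom_alphabet = key_unique + remaining_letters
--     return custom_alphabet
--
-- def create_vigenere_table(custom_alphabet):
--     table = []
--     for i in range(len(custom_alphabet)):
--         shifted_alphabet = custom_alphabet[i:] + custom_alphabet[:i]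
--         table.append(shifted_alphabet)
--     return table
--
-- def quagmire_decrypt(ciphertext, key1, key2):
--     custom_alphabet = create_custom_alphabet(key1)
--     vigenere_table = create_vigenere_table(custom_alphabet)
--
--     key2_index = 0
--     plaintext = ""
--
--     for ct_char in ciphertext.upper():
--         if ct_char in custom_alphabet:
--             k2_char = key2[key2_index % len(key2)].upper()
--             row = custom_alphabet.index(k2_char)
--             col = vigenere_table[row].index(ct_char)
--             plaintext += custom_alphabet[col]
--             key2_index += 1
--         else:
--             plaintext += ct_char
--
--     return plaintext
-- ===== SOURCE B (Python) =====
-- def create_custom_alphabet(key):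
--     base_alphabet = "ABCDEFGHIJKLMNOPQRSTUVWXYZ"
--     key_unique = ''.join(dict.fromkeys(key))
--     return key_unique + ''.join(c for c in base_alphabet if c not in key_unique)
--
-- def quagmire_decrypt(ciphertext, key1, key2):
--     custom_alphabet = create_custom_alphabet(key1)
--     n = len(custom_alphabet)
--     pos = {c: i for i, c in enumerate(custom_alphabet)}
--     key2_index = 0
--     out = []
--     for ct_char in ciphertext.upper():
--         p = pos.get(ct_char)
--         if p is None:
--             out.append(ct_char)
--         else:
--             row = pos[key2[key2_index % len(key2)].upper()]
--             out.append(custom_alphabet[(p - row) % n])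
--             key2_index += 1
--     return ''.join(out)
-- ===== Notes on version B (the rewrite author's own statement) =====
-- stated objective: simpler
-- what changed: B drops the Vigenere-table helper entirely: instead of building all n rotated alphabet rows and scanning a row with .index for every character, it builds one position dictionary over the custom alphabet and computes each plaintext position in closed form as (pos[ct] - pos[k2]) % n; the key alphabet is built with dict.fromkeys instead of sorted(set(key), key=key.index).
import Mathlib
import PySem

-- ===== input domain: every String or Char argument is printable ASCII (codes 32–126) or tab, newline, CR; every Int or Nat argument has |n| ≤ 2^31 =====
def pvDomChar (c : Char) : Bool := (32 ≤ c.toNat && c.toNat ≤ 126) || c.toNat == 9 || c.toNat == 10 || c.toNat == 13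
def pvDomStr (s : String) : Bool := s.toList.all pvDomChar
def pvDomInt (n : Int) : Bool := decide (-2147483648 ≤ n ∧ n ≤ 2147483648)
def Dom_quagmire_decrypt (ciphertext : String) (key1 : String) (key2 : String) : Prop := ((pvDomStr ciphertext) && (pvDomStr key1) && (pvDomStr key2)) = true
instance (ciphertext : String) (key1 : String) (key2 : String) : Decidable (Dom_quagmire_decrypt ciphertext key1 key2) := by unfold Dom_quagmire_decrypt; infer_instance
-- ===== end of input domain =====

-- B replaces A's Vigenère table and its per-character row scans by a position
-- dictionary and closed-form modular arithmetic (objective: simpler).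

-- ===== PORT A =====
-- sorted(set(key), key=key.index): every element of set(key) occurs in key, so
-- key.index never raises; the port totalises the sort key with getD 0.
def createCustomAlphabet (key : List Char) : List Char :=
  let baseAlphabet := "ABCDEFGHIJKLMNOPQRSTUVWXYZ".toList
  let keyUnique := PySem.List.sorted (PySem.Set.ofList key) (fun x => (PySem.List.index? key x).getD 0)
  let remaining := baseAlphabet.filter (fun c => !(keyUnique.contains c))
  keyUnique ++ remaining

def createVigenereTable (ca : List Char) : List (List Char) :=
  (PySem.List.pyRange 0 (PySem.List.len ca) 1).foldl
    (fun table i => table ++ [PySem.List.slice ca (some i) none ++ PySem.List.slice ca none (some i)]) []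

-- loop body of A; 'ct_char in custom_alphabet' on a single character is membership;
-- the two '.index' calls are PySem.Chars.find (-1 = ValueError, excluded by Pre_),
-- and key2[...] / vigenere_table[row] / custom_alphabet[col] are pyGetD (always in
-- range wherever A returns).
def aStep (ca : List Char) (vt : List (List Char)) (key2L : List Char)
    (st : Int × List Char) (ct : Char) : Int × List Char :=
  if ct ∈ ca then
    let k2c := PySem.Chars.upperChar (PySem.List.pyGetD key2L (PySem.Int.mod st.1 (PySem.List.len key2L)) 'A')
    let row := PySem.Chars.find ca [k2c]
    let col := PySem.Chars.find (PySem.List.pyGetD vt row []) [ct]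
    (st.1 + 1, st.2 ++ [PySem.List.pyGetD ca col 'A'])
  else (st.1, st.2 ++ [ct])

def quagmire_decrypt (ciphertext : String) (key1 : String) (key2 : String) : String :=
  let ca := createCustomAlphabet key1.toList
  let vt := createVigenereTable ca
  String.ofList (((PySem.Chars.upper ciphertext.toList).foldl (aStep ca vt key2.toList) (0, [])).2)

-- ===== PORT B =====
-- ''.join(dict.fromkeys(key)) is PySem.List.dedup
def createCustomAlphabetB (key : List Char) : List Char :=
  let keyUnique := PySem.List.dedup key
  keyUnique ++ "ABCDEFGHIJKLMNOPQRSTUVWXYZ".toList.filter (fun c => !(keyUnique.contains c))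

-- pos = {c: i for i, c in enumerate(custom_alphabet)}
def posDict (ca : List Char) : PySem.Dict Char Int :=
  (PySem.List.enumerate ca).foldl (fun d p => d.insert p.2 p.1) PySem.Dict.empty

-- loop body of B; pos.get(ct_char) is Dict.get?; pos[...] for the row is getD 0
-- (KeyError there = excluded by Pre_)
def bStep (ca : List Char) (pos : PySem.Dict Char Int) (key2L : List Char)
    (st : Int × List Char) (ct : Char) : Int × List Char :=
  match pos.get? ct with
  | none => (st.1, st.2 ++ [ct])
  | some p =>
    let row := pos.getD (PySem.Chars.upperChar (PySem.List.pyGetD key2L (PySem.Int.mod st.1 (PySem.List.len key2L)) 'A')) 0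
    (st.1 + 1, st.2 ++ [PySem.List.pyGetD ca (PySem.Int.mod (p - row) (PySem.List.len ca)) 'A'])

def quagmire_decrypt_alt (ciphertext : String) (key1 : String) (key2 : String) : String :=
  let ca := createCustomAlphabetB key1.toList
  let pos := posDict ca
  String.ofList (((PySem.Chars.upper ciphertext.toList).foldl (bStep ca pos key2.toList) (0, [])).2)

-- ===== PRECONDITION & SPEC =====
-- Pre_ excludes exactly the inputs on which A raises: when the uppercased ciphertext
-- contains at least one character of the custom alphabet, key2 must be nonempty
-- (else ZeroDivisionError) and every key2 character actually used (the first
-- min(len(key2), #in-alphabet-chars) of them) must uppercase into the custom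
-- alphabet (else ValueError on custom_alphabet.index); B raises there too (KeyError).
def Pre_quagmire_decrypt (ciphertext : String) (key1 : String) (key2 : String) : Prop :=
  (PySem.Chars.upper ciphertext.toList).countP (fun c => decide (c ∈ createCustomAlphabet key1.toList)) = 0
  ∨ (key2.toList ≠ [] ∧ ∀ j : Nat,
      j < min key2.toList.length ((PySem.Chars.upper ciphertext.toList).countP (fun c => decide (c ∈ createCustomAlphabet key1.toList))) →
      PySem.Chars.upperChar (key2.toList.getD j 'A') ∈ createCustomAlphabet key1.toList)

instance (ciphertext : String) (key1 : String) (key2 : String) : Decidable (Pre_quagmire_decrypt ciphertext key1 key2) := by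
  unfold Pre_quagmire_decrypt; infer_instance

def pvWitness_quagmire_decrypt : String × String × String := ("HELLO, WORLD!", "KEY", "AB")

def Spec_quagmire_decrypt (ciphertext : String) (key1 : String) (key2 : String) (out : String) : Prop := out = quagmire_decrypt_alt ciphertext key1 key2
instance (ciphertext : String) (key1 : String) (key2 : String) (out : String) : Decidable (Spec_quagmire_decrypt ciphertext key1 key2 out) := by unfold Spec_quagmire_decrypt; infer_instance

-- ===== CLAIM (what is proved, stated in full; the proofs are below) =====
def Claim_equal_quagmire_decrypt : Prop := ∀ (ciphertext : String) (key1 : String) (key2 : String), Dom_quagmire_decrypt ciphertext key1 key2 → Pre_quagmire_decrypt ciphertext key1 key2 → Spec_quagmire_decrypt ciphertext key1 key2 (quagmire_decrypt ciphertext key1 key2)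

-- ===== LEMMAS AND PROOFS =====

-- in a Nodup list the index of the element found at i is i (getElem? form)
theorem nodup_idxOf_eq (l : List Char) (hnd : l.Nodup) (i : Nat) (c : Char) (h : l[i]? = some c) :
    List.idxOf c l = i := by
  obtain ⟨hlt, rfl⟩ := List.getElem?_eq_some_iff.1 h
  exact List.Nodup.idxOf_getElem hnd i hlt

theorem idxOf?_mem (l : List Char) (a : Char) (h : a ∈ l) :
    List.idxOf? a l = some (List.idxOf a l) := by
  rw [List.idxOf?_eq_some_iff]
  have hlt := List.idxOf_lt_length_iff.2 h
  refine ⟨hlt, List.getElem_idxOf hlt, ?_⟩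
  intro j hj hja
  have hjl : j < l.length := by omega
  have hmem : a ∈ l.take (j + 1) := by
    apply List.mem_of_getElem? (i := j)
    rw [List.getElem?_take, if_pos (by omega), List.getElem?_eq_getElem hjl, hja]
  have := (List.mem_take_iff_idxOf_lt h).1 hmem
  omega

-- set(key) is already in first-occurrence order …
theorem pairwise_idxOf_ofList (key : List Char) :
    (PySem.Set.ofList key).Pairwise (fun a b => List.idxOf a key < List.idxOf b key) := by
  induction key with
  | nil => simp [PySem.Set.ofList]
  | cons x xs ih =>
    rw [PySem.Set.ofList_cons]
    constructor
    · intro b hb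
      obtain ⟨hbm, hbx⟩ := (PySem.Set.mem_discard _ _ _).1 hb
      rw [List.idxOf_cons_self, List.idxOf_cons_ne _ (fun e => hbx e.symm)]
      omega
    · have hsub : ((PySem.Set.ofList xs).discard x).Sublist (PySem.Set.ofList xs) :=
        List.filter_sublist
      refine ((ih.sublist hsub).imp_of_mem ?_)
      intro a b ha hb hlt
      obtain ⟨_, hax⟩ := (PySem.Set.mem_discard _ _ _).1 ha
      obtain ⟨_, hbx⟩ := (PySem.Set.mem_discard _ _ _).1 hb
      rw [List.idxOf_cons_ne _ (fun e => hax e.symm), List.idxOf_cons_ne _ (fun e => hbx e.symm)]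
      omega

-- … so sorting it by key.index is the identity: A's key_unique is dict.fromkeys(key)
theorem sorted_ofList_eq (key : List Char) :
    PySem.List.sorted (PySem.Set.ofList key) (fun x => (PySem.List.index? key x).getD 0)
      = PySem.Set.ofList key := by
  apply PySem.List.sorted_eq_of_perm_of_pairwise_lt _ _ _ (List.Perm.refl _)
  refine (pairwise_idxOf_ofList key).imp_of_mem ?_
  intro a b ha hb hlt
  have ha' : a ∈ key := (PySem.Set.mem_ofList _ _).1 ha
  have hb' : b ∈ key := (PySem.Set.mem_ofList _ _).1 hb
  simpa [PySem.List.index?, idxOf?_mem _ _ ha', idxOf?_mem _ _ hb'] using hlt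

theorem alphabet_eq (key : List Char) : createCustomAlphabetB key = createCustomAlphabet key := by
  unfold createCustomAlphabet createCustomAlphabetB
  rw [sorted_ofList_eq]
  rfl

theorem alphabet_nodup (key : List Char) : (createCustomAlphabet key).Nodup := by
  rw [← alphabet_eq]
  unfold createCustomAlphabetB
  rw [List.nodup_append]
  refine ⟨PySem.Set.nodup_ofList key, ?_, ?_⟩
  · exact (List.filter_sublist).nodup (by decide)
  · intro a ha b hb
    rintro rfl
    rw [List.mem_filter] at hb
    have : ¬ (PySem.List.dedup key).contains a = true := by simpa using hb.2
    exact this ((PySem.Set.contains_iff _ _).2 ha)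

theorem enum_map_snd (l : List Char) (s : Int) : (PySem.List.enumerate l s).map (fun p => p.2) = l := by
  induction l generalizing s with
  | nil => rfl
  | cons x t ih => simp [PySem.List.enumerate, ih (s + 1)]

theorem mem_enum (l : List Char) (j : Nat) (h : j < l.length) (s : Int) :
    ((s + (j : Int), l[j]) ∈ PySem.List.enumerate l s) := by
  induction l generalizing j s with
  | nil => simp at h
  | cons x t ih =>
    cases j with
    | zero => simp [PySem.List.enumerate]
    | succ k =>
      have h' := ih k (by simpa using h) (s + 1)
      simp only [PySem.List.enumerate, List.mem_cons]
      refine Or.inr ?_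
      have he : s + ((k : Int) + 1) = (s + 1) + (k : Int) := by ring
      simpa [he] using h'

theorem posDict_keys (ca : List Char) (hnd : ca.Nodup) : (posDict ca).keys = ca := by
  unfold posDict
  have h := PySem.Dict.keys_foldl_insert_key (PySem.List.enumerate ca) (fun p : Int × Char => p.2) (fun _ p => p.1) (PySem.Dict.empty)
  rw [PySem.Dict.keys_empty, PySem.Set.update_nil_left, enum_map_snd] at h
  exact h.trans (PySem.Set.ofList_eq_self_of_nodup _ hnd)

theorem posDict_items (ca : List Char) (hnd : ca.Nodup) :
    (posDict ca).items = (PySem.List.enumerate ca).map (fun p => (p.2, p.1)) := by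
  unfold posDict
  have h := PySem.Dict.items_foldl_insert_fresh (PySem.List.enumerate ca) (fun p : Int × Char => p.2) (fun p => p.1) PySem.Dict.empty
    (fun a _ => PySem.Dict.contains_empty _) (by rw [enum_map_snd]; exact hnd)
  simpa using h

theorem posDict_get? (ca : List Char) (hnd : ca.Nodup) (c : Char) (hc : c ∈ ca) :
    (posDict ca).get? c = some ((List.idxOf c ca : Nat) : Int) := by
  have hkn : (posDict ca).keys.Nodup := by rw [posDict_keys ca hnd]; exact hnd
  apply PySem.Dict.get?_of_mem_items _ ?_ hkn
  rw [posDict_items ca hnd]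
  have hpl : List.idxOf c ca < ca.length := List.idxOf_lt_length_iff.2 hc
  have hm := mem_enum ca (List.idxOf c ca) hpl 0
  rw [List.getElem_idxOf hpl] at hm
  have h0 : ((0 : Int) + (List.idxOf c ca : Int)) = (List.idxOf c ca : Int) := by ring
  rw [h0] at hm
  exact List.mem_map.2 ⟨_, hm, rfl⟩

theorem posDict_get?_none (ca : List Char) (hnd : ca.Nodup) (c : Char) (hc : c ∉ ca) :
    (posDict ca).get? c = none := by
  rw [PySem.Dict.get?_eq_none_iff_not_mem_keys, posDict_keys ca hnd]
  exact hc

theorem mod_closed (p r n : Nat) (hp : p < n) (hr : r < n) :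
    PySem.Int.mod ((p : Int) - (r : Int)) (n : Int)
      = (((if r ≤ p then p - r else n - r + p) : Nat) : Int) := by
  have hn : (0 : Int) < n := by exact_mod_cast Nat.zero_lt_of_lt hp
  rw [PySem.Int.mod_eq_emod_of_pos hn]
  split_ifs with h
  · rw [Int.emod_eq_of_lt (by omega) (by omega)]
    omega
  · rw [← Int.add_emod_right, Int.emod_eq_of_lt (by omega) (by omega)]
    omega

theorem vt_row (ca : List Char) (r : Nat) (hr : r < ca.length) :
    PySem.List.pyGetD (createVigenereTable ca) ((r : Nat) : Int) [] = ca.drop r ++ ca.take r := by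
  unfold createVigenereTable
  rw [PySem.List.foldl_append_singleton_eq_map, List.nil_append, PySem.List.len_eq,
    PySem.List.pyGetD_map_pyRange _ ca.length r _ hr,
    PySem.List.slice_from_natCast, PySem.List.slice_to_natCast]

theorem find_singleton (cs : List Char) (c : Char) (h : c ∈ cs) :
    PySem.Chars.find cs [c] = ((List.idxOf c cs : Nat) : Int) := by
  have hinf : [c] <:+: cs := (List.singleton_infix_iff c cs).2 h
  have h0 : 0 ≤ PySem.Chars.find cs [c] := (PySem.Chars.find_nonneg_iff cs [c]).2 hinf
  obtain ⟨hpre, hmin⟩ := PySem.Chars.find_spec h0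
  set k := (PySem.Chars.find cs [c]).toNat with hk
  have hgk : cs[k]? = some c := by
    rcases hpre with ⟨t, ht⟩
    rw [← List.head?_drop, ← ht]
    rfl
  have hkl : k < cs.length := (List.getElem?_eq_some_iff.1 hgk).1
  have hle : List.idxOf c cs ≤ k := by
    have hmem : c ∈ cs.take (k + 1) := by
      apply List.mem_of_getElem? (i := k)
      rw [List.getElem?_take, if_pos (by omega)]
      exact hgk
    have := (List.mem_take_iff_idxOf_lt h).1 hmem
    omega
  have hge : ¬ List.idxOf c cs < k := by
    intro hlt
    apply hmin (List.idxOf c cs) hlt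
    have hd : (cs.drop (List.idxOf c cs)).head? = some c := by
      rw [List.head?_drop]; exact List.getElem?_idxOf h
    exact ⟨(cs.drop (List.idxOf c cs)).tail, by simpa using List.cons_head?_tail hd⟩
  omega

-- the index of c in the row-r rotation of a Nodup alphabet, in closed form
theorem rot_idxOf (ca : List Char) (hnd : ca.Nodup) (c : Char) (hc : c ∈ ca) (r : Nat) (_hr : r < ca.length) :
    List.idxOf c (ca.drop r ++ ca.take r)
      = if r ≤ List.idxOf c ca then List.idxOf c ca - r else ca.length - r + List.idxOf c ca := by
  set p := List.idxOf c ca with hp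
  have hpl : p < ca.length := List.idxOf_lt_length_iff.2 hc
  have hgp : ca[p]? = some c := List.getElem?_idxOf hc
  rw [List.idxOf_append]
  split_ifs with hmem hle hle
  · have hdp : (ca.drop r)[p - r]? = some c := by
      rw [List.getElem?_drop]
      have he : r + (p - r) = p := by omega
      rw [he]; exact hgp
    rw [nodup_idxOf_eq _ (hnd.sublist (List.drop_sublist _ _)) _ _ hdp]
  · exfalso
    obtain ⟨i, hgi⟩ := List.getElem?_of_mem hmem
    rw [List.getElem?_drop] at hgi
    have := nodup_idxOf_eq _ hnd _ _ hgi
    omega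
  · exfalso
    apply hmem
    apply List.mem_of_getElem? (i := p - r)
    rw [List.getElem?_drop]
    have he : r + (p - r) = p := by omega
    rw [he]; exact hgp
  · have htp : (ca.take r)[p]? = some c := by
      rw [List.getElem?_take, if_pos (by omega)]; exact hgp
    rw [nodup_idxOf_eq _ (hnd.sublist (List.take_sublist _ _)) _ _ htp]
    simp
    omega

-- the decryption loops of A and B run in lockstep
theorem fold_eq (key1L key2L : List Char) (l : List Char) (m : Nat) (out : List Char)
    (h2 : l.countP (fun c => decide (c ∈ createCustomAlphabet key1L)) ≠ 0 → key2L ≠ [])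
    (hg : ∀ k : Nat, k < l.countP (fun c => decide (c ∈ createCustomAlphabet key1L)) →
      PySem.Chars.upperChar (key2L.getD ((m + k) % key2L.length) 'A') ∈ createCustomAlphabet key1L) :
    l.foldl (aStep (createCustomAlphabet key1L) (createVigenereTable (createCustomAlphabet key1L)) key2L) (((m : Nat) : Int), out)
      = l.foldl (bStep (createCustomAlphabet key1L) (posDict (createCustomAlphabet key1L)) key2L) (((m : Nat) : Int), out) := by
  induction l generalizing m out with
  | nil => rfl
  | cons c t ih =>
    have hndca := alphabet_nodup key1L
    simp only [List.foldl_cons]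
    by_cases hc : c ∈ createCustomAlphabet key1L
    · have hcnt : (c :: t).countP (fun x => decide (x ∈ createCustomAlphabet key1L))
          = t.countP (fun x => decide (x ∈ createCustomAlphabet key1L)) + 1 := by
        simp [hc]
      have hne : key2L ≠ [] := h2 (by omega)
      have hlen2 : 0 < key2L.length := List.length_pos_iff.2 hne
      have hk2 : PySem.Chars.upperChar (key2L.getD (m % key2L.length) 'A') ∈ createCustomAlphabet key1L := by
        have := hg 0 (by omega)
        simpa using this
      set k2c := PySem.Chars.upperChar (key2L.getD (m % key2L.length) 'A') with hk2c
      set p := List.idxOf c (createCustomAlphabet key1L) with hpd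
      set r := List.idxOf k2c (createCustomAlphabet key1L) with hrd
      have hp : p < (createCustomAlphabet key1L).length := List.idxOf_lt_length_iff.2 hc
      have hr : r < (createCustomAlphabet key1L).length := List.idxOf_lt_length_iff.2 hk2
      have hcrot : c ∈ (createCustomAlphabet key1L).drop r ++ (createCustomAlphabet key1L).take r := by
        have h1 : c ∈ (createCustomAlphabet key1L).take r ++ (createCustomAlphabet key1L).drop r := by
          rw [List.take_append_drop]; exact hc
        rcases List.mem_append.1 h1 with h | h
        · exact List.mem_append.2 (Or.inr h)
        · exact List.mem_append.2 (Or.inl h)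
      have hstepA : aStep (createCustomAlphabet key1L) (createVigenereTable (createCustomAlphabet key1L)) key2L (((m : Nat) : Int), out) c
          = (((m : Nat) : Int) + 1, out ++ [(createCustomAlphabet key1L).getD
              (if r ≤ p then p - r else (createCustomAlphabet key1L).length - r + p) 'A']) := by
        simp only [aStep, if_pos hc, PySem.List.len_eq, PySem.Int.mod_natCast, PySem.List.pyGetD_natCast]
        rw [← hk2c, find_singleton _ _ hk2, ← hrd, vt_row _ r hr, find_singleton _ _ hcrot,
          rot_idxOf _ hndca _ hc _ hr, ← hpd, PySem.List.pyGetD_natCast]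
      have hstepB : bStep (createCustomAlphabet key1L) (posDict (createCustomAlphabet key1L)) key2L (((m : Nat) : Int), out) c
          = (((m : Nat) : Int) + 1, out ++ [(createCustomAlphabet key1L).getD
              (if r ≤ p then p - r else (createCustomAlphabet key1L).length - r + p) 'A']) := by
        simp only [bStep, posDict_get? _ hndca _ hc, PySem.List.len_eq, PySem.Int.mod_natCast, PySem.List.pyGetD_natCast]
        rw [← hk2c, PySem.Dict.getD_of_get?_eq_some _ 0 (posDict_get? _ hndca _ hk2), ← hrd, ← hpd,
          mod_closed p r _ hp hr, PySem.List.pyGetD_natCast]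
      rw [hstepA, hstepB, show (((m : Nat) : Int) + 1) = (((m + 1 : Nat) : Int)) from by push_cast; ring]
      apply ih (m + 1)
      · intro h; exact hne
      · intro k hk
        have := hg (k + 1) (by omega)
        rw [show m + (k + 1) = m + 1 + k from by omega] at this
        exact this
    · have hcnt : (c :: t).countP (fun x => decide (x ∈ createCustomAlphabet key1L))
          = t.countP (fun x => decide (x ∈ createCustomAlphabet key1L)) := by
        simp [hc]
      have hstepA : aStep (createCustomAlphabet key1L) (createVigenereTable (createCustomAlphabet key1L)) key2L (((m : Nat) : Int), out) c
          = (((m : Nat) : Int), out ++ [c]) := by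
        simp only [aStep, if_neg hc]
      have hstepB : bStep (createCustomAlphabet key1L) (posDict (createCustomAlphabet key1L)) key2L (((m : Nat) : Int), out) c
          = (((m : Nat) : Int), out ++ [c]) := by
        simp only [bStep, posDict_get?_none _ hndca _ hc]
      rw [hstepA, hstepB]
      apply ih m
      · intro h; exact h2 (by omega)
      · intro k hk
        exact hg k (by omega)

-- ===== VERDICT (by name: the statement is the Claim_ definition above) =====
theorem quagmire_decrypt_spec : Claim_equal_quagmire_decrypt := by
  intro ciphertext key1 key2 _ hpre
  unfold Spec_quagmire_decrypt quagmire_decrypt quagmire_decrypt_alt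
  rw [alphabet_eq]
  unfold Pre_quagmire_decrypt at hpre
  show String.ofList ((List.foldl (aStep (createCustomAlphabet key1.toList) (createVigenereTable (createCustomAlphabet key1.toList)) key2.toList) ((0 : Int), []) (PySem.Chars.upper ciphertext.toList)).2)
      = String.ofList ((List.foldl (bStep (createCustomAlphabet key1.toList) (posDict (createCustomAlphabet key1.toList)) key2.toList) ((0 : Int), []) (PySem.Chars.upper ciphertext.toList)).2)
  congr 1
  have h0 : ((0 : Int)) = ((0 : Nat) : Int) := by norm_num
  rw [h0]
  rw [fold_eq key1.toList key2.toList _ 0 []]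
  · rcases hpre with h | ⟨hne, _⟩
    · intro hcnt; exact absurd h hcnt
    · intro _; exact hne
  · intro k hk
    rcases hpre with h | ⟨hne, hall⟩
    · omega
    · have hlen2 : 0 < key2.toList.length := List.length_pos_iff.2 hne
      have := hall (k % key2.toList.length)
        (lt_min (Nat.mod_lt _ hlen2) (Nat.lt_of_le_of_lt (Nat.mod_le _ _) hk))
      simpa using this
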